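-- pv_equiv track=rewrite | github.com/barneyb/aoc-2023 | python/aoc2018/day18/settlers_of_the_north_pole.py | tick
-- ===== SOURCE A (Python) =====
-- from collections import Counter
--
-- def tick(model):
--     def in_bounds(p):
--         r, c = p
--         return 0 <= r < h and 0 <= c < w
--
--     def neighbors(w, h, p):
--         r, c = p
--         return filter(
--             in_bounds,
--             [
--                 (r - 1, c - 1),
--                 (r - 1, c),
--                 (r - 1, c + 1),
--                 (r, c + 1),
--                 (r + 1, c + 1),
--                 (r + 1, c),
--                 (r + 1, c - 1),
--                 (r, c - 1),
--             ],
--         )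
--
--     w, h, prev = model
--     curr = []
--     for r, line in enumerate(prev):
--         cr = []
--         for c, s in enumerate(line):
--             hist = Counter(prev[a][b] for a, b in neighbors(w, h, (r, c)))
--             match prev[r][c]:
--                 case ".":
--                     cr.append("|" if hist["|"] >= 3 else ".")
--                 case "|":
--                     cr.append("#" if hist["#"] >= 3 else "|")
--                 case "#":
--                     cr.append("#" if hist["#"] and hist["|"] else ".")
--         curr.append("".join(cr))
--     return w, h, curr
-- ===== SOURCE B (Python) =====
-- OFFSETS = [(1, 1), (1, 0), (1, -1), (0, -1), (-1, -1), (-1, 0), (-1, 1), (0, 1)]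
--
--
-- def tick(model):
--     w, h, prev = model
--     bars = {}
--     hashes = {}
--     for r, line in enumerate(prev):
--         for c, s in enumerate(line):
--             if s == "|":
--                 tgt = bars
--             elif s == "#":
--                 tgt = hashes
--             else:
--                 continue
--             for dr, dc in OFFSETS:
--                 a, b = r + dr, c + dc
--                 if 0 <= a < h and 0 <= b < w:
--                     tgt[(a, b)] = tgt.get((a, b), 0) + 1
--     curr = []
--     for r, line in enumerate(prev):
--         cr = []
--         for c, s in enumerate(line):
--             nb = bars.get((r, c), 0)
--             nh = hashes.get((r, c), 0)
--             if s == ".":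
--                 cr.append("|" if nb >= 3 else ".")
--             elif s == "|":
--                 cr.append("#" if nh >= 3 else "|")
--             elif s == "#":
--                 cr.append("#" if nh > 0 and nb > 0 else ".")
--         curr.append("".join(cr))
--     return w, h, curr
-- ===== Notes on version B (the rewrite author's own statement) =====
-- stated objective: alternative
-- what changed: Replaces the per-cell gather (a Counter over the 8 in-bounds neighbors of every cell) by a scatter pass that precomputes two whole-board count maps (one per symbol; each cell increments its in-bounds neighbors' counts) followed by a second pass that applies the three rules from the precomputed counts only.
-- outside the precondition, e.g. on tick((1, 1, ['#', '|#'])): A returns (1, 1, ['.', '|.']), B returns (1, 1, ['#', '|.'])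
import Mathlib
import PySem

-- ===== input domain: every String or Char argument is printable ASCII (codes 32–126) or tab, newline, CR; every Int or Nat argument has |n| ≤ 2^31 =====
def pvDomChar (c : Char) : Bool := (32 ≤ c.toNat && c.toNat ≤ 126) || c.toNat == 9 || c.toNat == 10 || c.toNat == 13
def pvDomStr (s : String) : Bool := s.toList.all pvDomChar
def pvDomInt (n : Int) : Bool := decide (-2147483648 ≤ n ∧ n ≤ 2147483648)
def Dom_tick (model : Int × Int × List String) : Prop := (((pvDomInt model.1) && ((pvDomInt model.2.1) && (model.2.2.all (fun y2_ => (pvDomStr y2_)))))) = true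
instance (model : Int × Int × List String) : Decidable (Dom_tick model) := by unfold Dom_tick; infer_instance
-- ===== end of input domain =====

-- One honest line: B replaces A's per-cell neighbor gather (a Counter per cell) by a scatter
-- pass building two whole-board count maps, then a second pass applying the rules from them;
-- objective: alternative decomposition (same asymptotic cost).

-- ===== PORT A =====
def tickInBounds (w h : Int) (p : Int × Int) : Bool :=
  decide (0 ≤ p.1) && decide (p.1 < h) && decide (0 ≤ p.2) && decide (p.2 < w)

def tickNeighbors (w h : Int) (p : Int × Int) : List (Int × Int) :=
  ([(p.1 - 1, p.2 - 1), (p.1 - 1, p.2), (p.1 - 1, p.2 + 1), (p.1, p.2 + 1),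
    (p.1 + 1, p.2 + 1), (p.1 + 1, p.2), (p.1 + 1, p.2 - 1), (p.1, p.2 - 1)]).filter
    (tickInBounds w h)

-- prev[a][b]; exact wherever Python does not raise (under Pre_ every in-bounds lookup succeeds,
-- so the 'none'-drop of filterMap below is unreachable there)
def tickGridGet? (prev : List String) (a b : Int) : Option Char :=
  (PySem.List.pyGet? prev a).bind (fun row => PySem.Str.pyGet? row b)

-- transliteration of A; 'match prev[r][c]' is read as the enumerated char s, which Python's
-- enumerate guarantees equal to prev[r][c]
def tick (model : Int × Int × List String) : Int × Int × List String :=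
  let w := model.1
  let h := model.2.1
  let prev := model.2.2
  let curr := (PySem.List.enumerate prev).foldl (fun curr rl =>
    let cr : List Char := (PySem.List.enumerate rl.2.toList).foldl (fun cr cs =>
      let hist : PySem.Dict Char Int :=
        PySem.Dict.counter
          ((tickNeighbors w h (rl.1, cs.1)).filterMap (fun ab => tickGridGet? prev ab.1 ab.2))
      match cs.2 with
      | '.' => cr ++ [if hist.getD '|' 0 ≥ 3 then '|' else '.']
      | '|' => cr ++ [if hist.getD '#' 0 ≥ 3 then '#' else '|']
      | '#' => cr ++ [if hist.getD '#' 0 != 0 && hist.getD '|' 0 != 0 then '#' else '.']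
      | _ => cr) []
    curr ++ [String.ofList cr]) []
  (w, h, curr)

-- ===== PORT B =====
def tickOffsets : List (Int × Int) :=
  [(1, 1), (1, 0), (1, -1), (0, -1), (-1, -1), (-1, 0), (-1, 1), (0, 1)]

def tickScatter (w h r c : Int) (d : PySem.Dict (Int × Int) Int) : PySem.Dict (Int × Int) Int :=
  tickOffsets.foldl (fun d o =>
    if 0 ≤ r + o.1 ∧ r + o.1 < h ∧ 0 ≤ c + o.2 ∧ c + o.2 < w then
      d.insert (r + o.1, c + o.2) (d.getD (r + o.1, c + o.2) 0 + 1)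
    else d) d

def tick_alt (model : Int × Int × List String) : Int × Int × List String :=
  let w := model.1
  let h := model.2.1
  let prev := model.2.2
  let counts := (PySem.List.enumerate prev).foldl (fun st rl =>
    (PySem.List.enumerate rl.2.toList).foldl (fun st cs =>
      if cs.2 = '|' then (tickScatter w h rl.1 cs.1 st.1, st.2)
      else if cs.2 = '#' then (st.1, tickScatter w h rl.1 cs.1 st.2)
      else st) st) ((PySem.Dict.empty : PySem.Dict (Int × Int) Int), (PySem.Dict.empty : PySem.Dict (Int × Int) Int))
  let curr := (PySem.List.enumerate prev).foldl (fun curr rl =>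
    let cr : List Char := (PySem.List.enumerate rl.2.toList).foldl (fun cr cs =>
      let nb := counts.1.getD (rl.1, cs.1) 0
      let nh := counts.2.getD (rl.1, cs.1) 0
      if cs.2 = '.' then cr ++ [if nb ≥ 3 then '|' else '.']
      else if cs.2 = '|' then cr ++ [if nh ≥ 3 then '#' else '|']
      else if cs.2 = '#' then cr ++ [if nh > 0 && nb > 0 then '#' else '.']
      else cr) []
    curr ++ [String.ofList cr]) []
  (w, h, curr)

-- ===== PRECONDITION & SPEC =====
-- Pre_ admits models that are either well-formed (h = number of rows, every row of length
-- w) or have an empty w×h window (h ≤ 0, w ≤ 0, or all rows empty); on the remaining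
-- mismatched models A either raises IndexError or reads cells outside the declared w×h
-- window, an accident of its gather's clamping that a scatter formulation does not share.
def Pre_tick (model : Int × Int × List String) : Prop :=
  (model.2.1 = (model.2.2.length : Int) ∧
    ∀ line ∈ model.2.2, (line.toList.length : Int) = model.1) ∨
  model.2.1 ≤ 0 ∨ model.1 ≤ 0 ∨ (∀ line ∈ model.2.2, line = "")

instance (model : Int × Int × List String) : Decidable (Pre_tick model) := by
  unfold Pre_tick; infer_instance

def pvWitness_tick : (Int × Int × List String) := (2, 2, [".|", "#."])

def Spec_tick (model : Int × Int × List String) (out : Int × Int × List String) : Prop :=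
  out = tick_alt model

instance (model : Int × Int × List String) (out : Int × Int × List String) :
    Decidable (Spec_tick model out) := by unfold Spec_tick; infer_instance

-- ===== CLAIM (what is proved, stated in full; the proofs are below) =====
def Claim_equal_tick : Prop :=
  ∀ (model : Int × Int × List String), Dom_tick model → Pre_tick model →
    Spec_tick model (tick model)

-- ===== LEMMAS AND PROOFS =====

-- proof-side helpers
def gridRow (prev : List String) (a : Int) : List Char := (prev.getD a.toNat "").toList

def gridChar (prev : List String) (q : Int × Int) : Char := (gridRow prev q.1).getD q.2.toNat ' '

def validB (prev : List String) (q : Int × Int) : Bool :=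
  decide (0 ≤ q.1) && decide (q.1 < (prev.length : Int)) &&
  decide (0 ≤ q.2) && decide (q.2 < ((gridRow prev q.1).length : Int))

def nbTermP (prev : List String) (pred : Char → Bool) (q : Int × Int) : Nat :=
  if (validB prev q && pred (gridChar prev q)) = true then 1 else 0

def cntNb (prev : List String) (pred : Char → Bool) (p : Int × Int) : Nat :=
  nbTermP prev pred (p.1 - 1, p.2 - 1) + nbTermP prev pred (p.1 - 1, p.2) +
  nbTermP prev pred (p.1 - 1, p.2 + 1) + nbTermP prev pred (p.1, p.2 + 1) +
  nbTermP prev pred (p.1 + 1, p.2 + 1) + nbTermP prev pred (p.1 + 1, p.2) +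
  nbTermP prev pred (p.1 + 1, p.2 - 1) + nbTermP prev pred (p.1, p.2 - 1)

def tgtKeys (w h r c : Int) : List (Int × Int) :=
  (tickOffsets.filter (fun o =>
      decide (0 ≤ r + o.1 ∧ r + o.1 < h ∧ 0 ≤ c + o.2 ∧ c + o.2 < w))).map
    (fun o => (r + o.1, c + o.2))

def scatFold (w h : Int) (prev : List String) (pred : Char → Bool) :
    PySem.Dict (Int × Int) Int :=
  (PySem.List.enumerate prev).foldl (fun d rl =>
    (PySem.List.enumerate rl.2.toList).foldl (fun d cs =>
      if pred cs.2 = true then tickScatter w h rl.1 cs.1 d else d) d) PySem.Dict.empty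

-- generic list lemmas
theorem sum_map_add_nat {α : Type} (l : List α) (f g : α → Nat) :
    (l.map (fun x => f x + g x)).sum = (l.map f).sum + (l.map g).sum := by
  induction l with
  | nil => simp
  | cons x t ih => simp [ih]; omega

theorem enum_sum_ite {α : Type} (dflt : α) (f : α → Nat) (xs : List α) : ∀ (s a : Int),
    ((PySem.List.enumerate xs s).map (fun ix => if ix.1 = a then f ix.2 else 0)).sum
      = if s ≤ a ∧ a < s + (xs.length : Int) then f (xs.getD (a - s).toNat dflt) else 0 := by
  induction xs with
  | nil =>
      intro s a
      rw [List.length_nil, if_neg (by push_cast; omega)]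
      simp [PySem.List.enumerate_nil]
  | cons x t ih =>
      intro s a
      rw [PySem.List.enumerate_cons]
      simp only [List.map_cons, List.sum_cons, ih (s + 1) a, List.length_cons]
      push_cast
      by_cases hsa : s = a
      · subst hsa
        rw [if_pos rfl, if_neg (by omega), if_pos (by omega)]
        have hzz : (s - s).toNat = 0 := by omega
        rw [hzz, List.getD_cons_zero]
        omega
      · rw [if_neg hsa]
        by_cases hin : s + 1 ≤ a ∧ a < s + 1 + (t.length : Int)
        · rw [if_pos hin, if_pos (show s ≤ a ∧ a < s + ((t.length : Int) + 1) by omega)]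
          have hidx : (a - s).toNat = (a - (s + 1)).toNat + 1 := by omega
          rw [hidx, List.getD_cons_succ]
          omega
        · rw [if_neg hin, if_neg (by omega)]

def charTerm (pred : Char → Bool) (ch : Char) : Nat := if pred ch = true then 1 else 0

def innerSum (pred : Char → Bool) (b : Int) (line : String) : Nat :=
  ((PySem.List.enumerate line.toList).map (fun cs =>
      if cs.1 = b then charTerm pred cs.2 else 0)).sum

theorem grid_sum (prev : List String) (pred : Char → Bool) (a b : Int) :
    ((PySem.List.enumerate prev).map (fun rl =>
        ((PySem.List.enumerate rl.2.toList).map (fun cs =>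
            if rl.1 = a ∧ cs.1 = b ∧ pred cs.2 = true then 1 else 0)).sum)).sum
      = nbTermP prev pred (a, b) := by
  have hrow : ∀ rl : Int × String, rl ∈ PySem.List.enumerate prev →
      ((PySem.List.enumerate rl.2.toList).map (fun cs =>
          if rl.1 = a ∧ cs.1 = b ∧ pred cs.2 = true then 1 else 0)).sum
        = if rl.1 = a then innerSum pred b rl.2 else 0 := by
    intro rl _
    by_cases hr : rl.1 = a
    · rw [if_pos hr]
      unfold innerSum
      apply congrArg
      apply List.map_congr_left
      intro cs _
      unfold charTerm
      by_cases h1 : cs.1 = b <;> by_cases h2 : pred cs.2 = true <;> simp [h1, h2, hr]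
    · rw [if_neg hr]
      have hz : ∀ cs : Int × Char,
          (if rl.1 = a ∧ cs.1 = b ∧ pred cs.2 = true then 1 else 0) = 0 := by
        intro cs; rw [if_neg (by tauto)]
      simp only [hz, List.map_const']
      simp
  rw [List.map_congr_left hrow, enum_sum_ite "" (innerSum pred b) prev 0 a]
  unfold innerSum
  rw [enum_sum_ite ' ' (charTerm pred) ((prev.getD (a - 0).toNat "").toList) 0 b]
  unfold charTerm nbTermP validB gridChar gridRow
  have hsub : a - 0 = a := by omega
  have hsub2 : b - 0 = b := by omega
  rw [hsub, hsub2]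
  by_cases ha : 0 ≤ a ∧ a < (0 : Int) + (prev.length : Int)
  · rw [if_pos ha]
    by_cases hb : 0 ≤ b ∧ b < (0 : Int) + (((prev.getD a.toNat "").toList.length : Int))
    · rw [if_pos hb]
      by_cases hc : pred ((prev.getD a.toNat "").toList.getD b.toNat ' ') = true
      · rw [if_pos hc, if_pos (by
          simp only [Bool.and_eq_true, decide_eq_true_eq]
          refine ⟨⟨⟨by omega, by omega⟩, by omega⟩, ?_⟩
          exact hc)]
      · rw [if_neg hc, if_neg (by
          simp only [Bool.and_eq_true, decide_eq_true_eq]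
          tauto)]
    · rw [if_neg hb, if_neg (by
        simp only [Bool.and_eq_true, decide_eq_true_eq]
        intro hcon
        exact hb ⟨by omega, by omega⟩)]
  · rw [if_neg ha, eq_comm]
    rw [if_neg (by
      simp only [Bool.and_eq_true, decide_eq_true_eq]
      intro hcon
      exact ha ⟨by omega, by omega⟩)]

theorem getD_inc_fold {κ : Type} [BEq κ] [LawfulBEq κ] (l : List κ) :
    ∀ (d : PySem.Dict κ Int) (v : κ),
      (l.foldl (fun d k => d.insert k (d.getD k 0 + 1)) d).getD v 0
        = d.getD v 0 + (l.count v : Int) := by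
  induction l with
  | nil => intro d v; simp
  | cons k t ih =>
      intro d v
      rw [List.foldl_cons, ih]
      by_cases hv : v = k
      · subst hv
        rw [PySem.Dict.getD_insert_self, List.count_cons_self]
        push_cast; ring
      · rw [PySem.Dict.getD_insert_of_ne _ _ _ hv]
        simp [Ne.symm hv]

theorem foldl_flatMap_eq {α δ κ : Type} (l : List α) (K : α → List κ) (g : δ → κ → δ) :
    ∀ (d : δ), l.foldl (fun d x => (K x).foldl g d) d = (l.flatMap K).foldl g d := by
  induction l with
  | nil => intro d; simp
  | cons x t ih => intro d; simp [List.foldl_append, ih]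

theorem count_flatMap_eq {α κ : Type} [BEq κ] (l : List α) (K : α → List κ) (v : κ) :
    (l.flatMap K).count v = (l.map (fun x => (K x).count v)).sum := by
  induction l with
  | nil => simp
  | cons x t ih => simp [List.count_append, ih]

theorem nested_foldl_prod {α β σ₁ σ₂ : Type} (rows : List α) (sub : α → List β)
    (f : σ₁ → α → β → σ₁) (g : σ₂ → α → β → σ₂) :
    ∀ (da : σ₁) (db : σ₂),
      rows.foldl (fun st x => (sub x).foldl (fun st y => (f st.1 x y, g st.2 x y)) st) (da, db)
        = (rows.foldl (fun d x => (sub x).foldl (fun d y => f d x y) d) da,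
           rows.foldl (fun d x => (sub x).foldl (fun d y => g d x y) d) db) := by
  induction rows with
  | nil => intro da db; simp
  | cons x t ih =>
      intro da db
      simp only [List.foldl_cons]
      rw [PySem.List.foldl_prod_mk (fun d y => f d x y) (fun d y => g d x y) (sub x) da db, ih]

theorem inb_eq_valid (w h : Int) (prev : List String)
    (hh : h = (prev.length : Int))
    (hw : ∀ line ∈ prev, (line.toList.length : Int) = w) (q : Int × Int) :
    tickInBounds w h q = validB prev q := by
  unfold tickInBounds validB
  subst hh
  by_cases h1 : 0 ≤ q.1
  · by_cases h2 : q.1 < (prev.length : Int)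
    · have hmem : prev.getD q.1.toNat "" ∈ prev := by
        rw [List.getD_eq_getElem prev "" (by omega)]
        exact List.getElem_mem _
      have hlen : ((gridRow prev q.1).length : Int) = w := by
        unfold gridRow
        exact hw _ hmem
      rw [← hlen]
    · simp [h2]
  · simp [h1]

theorem tickScatter_eq_keys (w h r c : Int) (d : PySem.Dict (Int × Int) Int) :
    tickScatter w h r c d
      = (tgtKeys w h r c).foldl (fun d k => d.insert k (d.getD k 0 + 1)) d := by
  unfold tickScatter tgtKeys
  rw [PySem.List.foldl_ite_eq_foldl_filter
    (fun o => 0 ≤ r + o.1 ∧ r + o.1 < h ∧ 0 ≤ c + o.2 ∧ c + o.2 < w)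
    (fun d o => d.insert (r + o.1, c + o.2) (d.getD (r + o.1, c + o.2) 0 + 1)) tickOffsets d]
  rw [List.foldl_map]

theorem getD_empty_int {κ : Type} [BEq κ] (v : κ) :
    (PySem.Dict.empty : PySem.Dict κ Int).getD v 0 = 0 := by
  simp [PySem.Dict.empty, PySem.Dict.getD, PySem.Dict.get?]

theorem filterMap_eq_map_of_forall {α β : Type} (l : List α) (f : α → Option β) (g : α → β)
    (h : ∀ a ∈ l, f a = some (g a)) : l.filterMap f = l.map g := by
  induction l with
  | nil => simp
  | cons x t ih =>
      rw [List.filterMap_cons, h x (by simp), List.map_cons,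
        ih (fun a ha => h a (by simp [ha]))]

theorem str_pyGet_eq (s : String) (i : Int) (h1 : 0 ≤ i)
    (h2 : i < (s.toList.length : Int)) :
    PySem.Str.pyGet? s i = some (s.toList.getD i.toNat ' ') := by
  have hb : PySem.Str.pyGet? s i = PySem.List.pyGet? s.toList i := by simp
  rw [hb, PySem.List.pyGet?_eq_some_getElem s.toList h1 h2,
    List.getD_eq_getElem s.toList ' ' (by omega)]

theorem histA_count (w h : Int) (prev : List String)
    (hh : h = (prev.length : Int))
    (hw : ∀ line ∈ prev, (line.toList.length : Int) = w) (ch : Char) (p : Int × Int) :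
    (PySem.Dict.counter
        ((tickNeighbors w h p).filterMap (fun ab => tickGridGet? prev ab.1 ab.2))).getD ch 0
      = (cntNb prev (· == ch) p : Int) := by
  have hsome : ∀ ab ∈ tickNeighbors w h p,
      tickGridGet? prev ab.1 ab.2 = some (gridChar prev ab) := by
    intro ab hab
    unfold tickNeighbors at hab
    have hin := List.of_mem_filter hab
    rw [inb_eq_valid w h prev hh hw ab] at hin
    unfold validB at hin
    simp only [Bool.and_eq_true, decide_eq_true_eq] at hin
    obtain ⟨⟨⟨ha1, ha2⟩, hb1⟩, hb2⟩ := hin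
    unfold gridRow at hb2
    unfold tickGridGet? gridChar gridRow
    rw [PySem.List.pyGet?_eq_some_getElem prev ha1 ha2]
    have hrowe : prev.getD ab.1.toNat "" = prev[ab.1.toNat] :=
      List.getD_eq_getElem prev "" (by omega)
    rw [hrowe]
    rw [hrowe] at hb2
    show PySem.Str.pyGet? prev[ab.1.toNat] ab.2
        = some ((prev[ab.1.toNat]).toList.getD ab.2.toNat ' ')
    exact str_pyGet_eq _ _ hb1 hb2
  rw [filterMap_eq_map_of_forall _ _ _ hsome, PySem.Dict.getD_counter,
    List.count_eq_countP, List.countP_map]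
  unfold tickNeighbors
  rw [List.countP_filter]
  have hpred : ∀ q : Int × Int,
      (((fun x => x == ch) ∘ gridChar prev) q && tickInBounds w h q)
        = (validB prev q && (gridChar prev q == ch)) := by
    intro q
    rw [inb_eq_valid w h prev hh hw q, Bool.and_comm]
    rfl
  simp only [List.countP_cons, List.countP_nil, hpred]
  unfold cntNb nbTermP
  push_cast
  omega

theorem tgtKeys_count (w h : Int) (p : Int × Int) (hinb : tickInBounds w h p = true)
    (r' c' : Int) :
    (tgtKeys w h r' c').count p
      = List.countP (fun o => decide (r' = p.1 - o.1 ∧ c' = p.2 - o.2)) tickOffsets := by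
  obtain ⟨p1, p2⟩ := p
  unfold tgtKeys
  rw [List.count_eq_countP, List.countP_map, List.countP_filter]
  apply List.countP_congr
  intro o _
  have hB : ∀ (b1 b2 : Bool), b1 = b2 ↔ ((b1 = true) ↔ (b2 = true)) := by decide
  rw [hB]
  simp only [Function.comp_apply, Bool.and_eq_true, beq_iff_eq, decide_eq_true_eq,
    Prod.mk.injEq, iff_true]
  unfold tickInBounds at hinb
  simp only [Bool.and_eq_true, decide_eq_true_eq] at hinb
  omega

theorem cell_count (w h : Int) (p : Int × Int) (hinb : tickInBounds w h p = true)
    (r' c' : Int) (s : Char) (pred : Char → Bool) :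
    (if pred s = true then tgtKeys w h r' c' else []).count p
      = List.countP (fun o =>
          decide (r' = p.1 - o.1 ∧ c' = p.2 - o.2 ∧ pred s = true)) tickOffsets := by
  by_cases hc : pred s = true
  · rw [if_pos hc, tgtKeys_count w h p hinb r' c']
    apply List.countP_congr
    intro o _
    simp [hc]
  · rw [if_neg hc]
    have hz : ∀ o : (Int × Int),
        (decide (r' = p.1 - o.1 ∧ c' = p.2 - o.2 ∧ pred s = true)) = false := by
      intro o; simp [hc]
    simp only [List.count_nil, hz, List.countP_false]
    rfl

theorem scatB_count (w h : Int) (prev : List String)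
    (hh : h = (prev.length : Int))
    (hw : ∀ line ∈ prev, (line.toList.length : Int) = w)
    (pred : Char → Bool) (p : Int × Int) (hp : validB prev p = true) :
    (scatFold w h prev pred).getD p 0 = (cntNb prev pred p : Int) := by
  have hinb : tickInBounds w h p = true := by
    rw [inb_eq_valid w h prev hh hw p]; exact hp
  have hcell : ∀ (d : PySem.Dict (Int × Int) Int) (r' : Int) (cs : Int × Char),
      (if pred cs.2 = true then tickScatter w h r' cs.1 d else d)
        = (if pred cs.2 = true then tgtKeys w h r' cs.1 else []).foldl
            (fun d k => d.insert k (d.getD k 0 + 1)) d := by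
    intro d r' cs
    by_cases hc : pred cs.2 = true
    · rw [if_pos hc, if_pos hc, tickScatter_eq_keys]
    · rw [if_neg hc, if_neg hc]; rfl
  unfold scatFold
  simp only [hcell]
  have hinner : ∀ (rl : Int × String) (d : PySem.Dict (Int × Int) Int),
      (PySem.List.enumerate rl.2.toList).foldl (fun d cs =>
        ((if pred cs.2 = true then tgtKeys w h rl.1 cs.1 else []).foldl
          (fun d k => d.insert k (d.getD k 0 + 1)) d)) d
        = ((PySem.List.enumerate rl.2.toList).flatMap
            (fun cs => if pred cs.2 = true then tgtKeys w h rl.1 cs.1 else [])).foldl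
            (fun d k => d.insert k (d.getD k 0 + 1)) d := by
    intro rl d
    rw [foldl_flatMap_eq]
  simp only [hinner]
  rw [foldl_flatMap_eq, getD_inc_fold, getD_empty_int, count_flatMap_eq]
  simp only [count_flatMap_eq]
  simp only [cell_count w h p hinb]
  simp only [tickOffsets, List.countP_cons, List.countP_nil, decide_eq_true_eq]
  simp only [zero_add, sum_map_add_nat]
  rw [grid_sum, grid_sum, grid_sum, grid_sum, grid_sum, grid_sum, grid_sum, grid_sum]
  simp only [sub_zero, sub_neg_eq_add]
  unfold cntNb nbTermP
  push_cast
  omega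

theorem scatFold_eq_raw (w h : Int) (prev : List String) (ch : Char) :
    scatFold w h prev (fun s => s == ch)
      = List.foldl (fun d x =>
          List.foldl (fun d y => if (y.2 == ch) = true then tickScatter w h x.1 y.1 d else d)
            d (PySem.List.enumerate x.2.toList)) PySem.Dict.empty
          (PySem.List.enumerate prev) := rfl

theorem tick_eq_main (w h : Int) (prev : List String)
    (hh : h = (prev.length : Int))
    (hw : ∀ line ∈ prev, (line.toList.length : Int) = w) :
    tick (w, h, prev) = tick_alt (w, h, prev) := by
  have hstep : ∀ (st : PySem.Dict (Int × Int) Int × PySem.Dict (Int × Int) Int)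
      (rl : Int × String) (cs : Int × Char),
      (if cs.2 = '|' then (tickScatter w h rl.1 cs.1 st.1, st.2)
       else if cs.2 = '#' then (st.1, tickScatter w h rl.1 cs.1 st.2) else st)
        = ((if (cs.2 == '|') = true then tickScatter w h rl.1 cs.1 st.1 else st.1),
           (if (cs.2 == '#') = true then tickScatter w h rl.1 cs.1 st.2 else st.2)) := by
    intro st rl cs
    by_cases h1 : cs.2 = '|'
    · simp [h1]
    · by_cases h2 : cs.2 = '#'
      · simp [h2]
      · simp [h1, h2]
  have hcnt := nested_foldl_prod (PySem.List.enumerate prev)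
    (fun rl => PySem.List.enumerate rl.2.toList)
    (fun d rl cs => if (cs.2 == '|') = true then tickScatter w h rl.1 cs.1 d else d)
    (fun d rl cs => if (cs.2 == '#') = true then tickScatter w h rl.1 cs.1 d else d)
    (PySem.Dict.empty : PySem.Dict (Int × Int) Int)
    (PySem.Dict.empty : PySem.Dict (Int × Int) Int)
  unfold tick tick_alt
  dsimp only
  simp only [hstep]
  rw [hcnt, ← scatFold_eq_raw w h prev '|', ← scatFold_eq_raw w h prev '#']
  dsimp only
  refine congrArg (fun c => ((w : Int), (h : Int), c)) ?_
  apply PySem.List.foldl_congr_mem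
  intro acc rl hrl
  rw [PySem.List.mem_enumerate_iff] at hrl
  obtain ⟨k, hk, hrl⟩ := hrl
  simp only [zero_add] at hrl
  subst hrl
  refine congrArg (fun cr => acc ++ [String.ofList cr]) ?_
  apply PySem.List.foldl_congr_mem
  intro cr cs hcs
  rw [PySem.List.mem_enumerate_iff] at hcs
  obtain ⟨j, hj, hcs⟩ := hcs
  simp only [zero_add] at hcs
  subst hcs
  dsimp only at hj
  dsimp only
  have hvp : validB prev ((k : Int), (j : Int)) = true := by
    unfold validB gridRow
    rw [Int.toNat_natCast, List.getD_eq_getElem prev "" hk]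
    simp only [Bool.and_eq_true, decide_eq_true_eq]
    refine ⟨⟨⟨by omega, by omega⟩, by omega⟩, by omega⟩
  have hb1 := scatB_count w h prev hh hw (fun s => s == '|') ((k : Int), (j : Int)) hvp
  have hb2 := scatB_count w h prev hh hw (fun s => s == '#') ((k : Int), (j : Int)) hvp
  have ha1 := histA_count w h prev hh hw '|' ((k : Int), (j : Int))
  have ha2 := histA_count w h prev hh hw '#' ((k : Int), (j : Int))
  rw [ha1, ha2, hb1, hb2]
  split
  next heq => rw [heq]; simp
  next heq => rw [heq]; simp
  next heq =>
    rw [heq]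
    rw [if_neg (by decide : ¬ (('#' : Char) = '.')), if_neg (by decide : ¬ (('#' : Char) = '|')),
      if_pos (rfl : ('#' : Char) = '#')]
    refine congrArg (fun x => cr ++ [x]) ?_
    refine if_congr ?_ rfl rfl
    simp only [Bool.and_eq_true, bne_iff_ne, ne_eq, decide_eq_true_eq, gt_iff_lt]
    constructor
    · rintro ⟨h1, h2⟩
      exact ⟨by omega, by omega⟩
    · rintro ⟨h1, h2⟩
      exact ⟨by omega, by omega⟩
  next hne1 hne2 hne3 =>
    rw [if_neg hne1, if_neg hne2, if_neg hne3]

theorem inb_false (w h : Int) (hdeg : h ≤ 0 ∨ w ≤ 0) (q : Int × Int) :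
    tickInBounds w h q = false := by
  unfold tickInBounds
  by_cases h1 : 0 ≤ q.1
  · by_cases h2 : q.1 < h
    · by_cases h3 : 0 ≤ q.2
      · simp [h1, h2, h3, show ¬ (q.2 < w) by omega]
      · simp [h3]
    · simp [h2]
  · simp [h1]

theorem neighbors_nil (w h : Int) (hdeg : h ≤ 0 ∨ w ≤ 0) (p : Int × Int) :
    tickNeighbors w h p = [] := by
  unfold tickNeighbors
  simp [List.filter, inb_false w h hdeg]

theorem histA0 (w h : Int) (prev : List String) (hdeg : h ≤ 0 ∨ w ≤ 0) (ch : Char)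
    (p : Int × Int) :
    (PySem.Dict.counter
        ((tickNeighbors w h p).filterMap (fun ab => tickGridGet? prev ab.1 ab.2))).getD ch 0
      = 0 := by
  rw [neighbors_nil w h hdeg p, List.filterMap_nil, PySem.Dict.getD_counter]
  simp

theorem scat0 (w h r c : Int) (hdeg : h ≤ 0 ∨ w ≤ 0) (d : PySem.Dict (Int × Int) Int) :
    tickScatter w h r c d = d := by
  unfold tickScatter
  have hstep : ∀ (d : PySem.Dict (Int × Int) Int) (o : Int × Int), o ∈ tickOffsets →
      (if 0 ≤ r + o.1 ∧ r + o.1 < h ∧ 0 ≤ c + o.2 ∧ c + o.2 < w then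
        d.insert (r + o.1, c + o.2) (d.getD (r + o.1, c + o.2) 0 + 1) else d) = d := by
    intro d o _
    rcases hdeg with h0 | h0 <;> exact if_neg (by omega)
  exact Eq.trans (PySem.List.foldl_congr_mem tickOffsets _ (fun d _ => d) d hstep)
    (PySem.List.foldl_ignore tickOffsets d)

theorem tick_eq_degenerate (w h : Int) (prev : List String) (hdeg : h ≤ 0 ∨ w ≤ 0) :
    tick (w, h, prev) = tick_alt (w, h, prev) := by
  have hstep2 : ∀ (st : PySem.Dict (Int × Int) Int × PySem.Dict (Int × Int) Int)
      (rl : Int × String) (cs : Int × Char),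
      (if cs.2 = '|' then (tickScatter w h rl.1 cs.1 st.1, st.2)
       else if cs.2 = '#' then (st.1, tickScatter w h rl.1 cs.1 st.2) else st) = st := by
    intro st rl cs
    by_cases h1 : cs.2 = '|'
    · simp [h1, scat0 w h rl.1 cs.1 hdeg]
    · by_cases h2 : cs.2 = '#'
      · simp [h2, scat0 w h rl.1 cs.1 hdeg]
      · simp [h1, h2]
  unfold tick tick_alt
  dsimp only
  simp only [hstep2, PySem.List.foldl_ignore, histA0 w h prev hdeg, getD_empty_int]
  refine congrArg (fun c => ((w : Int), (h : Int), c)) ?_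
  apply PySem.List.foldl_congr_mem
  intro acc rl _
  refine congrArg (fun cr => acc ++ [String.ofList cr]) ?_
  apply PySem.List.foldl_congr_mem
  intro cr cs _
  split
  next heq => rw [heq]; simp
  next heq => rw [heq]; simp
  next heq =>
    rw [heq]
    rw [if_neg (by decide : ¬ (('#' : Char) = '.')), if_neg (by decide : ¬ (('#' : Char) = '|')),
      if_pos (rfl : ('#' : Char) = '#')]
    refine congrArg (fun x => cr ++ [x]) ?_
    refine if_congr ?_ rfl rfl
    constructor
    · intro hcon
      simp at hcon
    · intro hcon
      simp at hcon
  next hne1 hne2 hne3 =>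
    rw [if_neg hne1, if_neg hne2, if_neg hne3]

theorem tick_eq_empty (w h : Int) (prev : List String) (hemp : ∀ line ∈ prev, line = "") :
    tick (w, h, prev) = tick_alt (w, h, prev) := by
  unfold tick tick_alt
  dsimp only
  refine congrArg (fun c => ((w : Int), (h : Int), c)) ?_
  apply PySem.List.foldl_congr_mem
  intro acc rl hrl
  rw [PySem.List.mem_enumerate_iff] at hrl
  obtain ⟨k, hk, hrl⟩ := hrl
  simp only [zero_add] at hrl
  subst hrl
  dsimp only
  have h0 : prev[k] = "" := hemp _ (prev.getElem_mem hk)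
  rw [h0]
  simp [PySem.List.enumerate_nil]

-- ===== VERDICT (by name: the statement is the Claim_ definition above) =====
theorem tick_spec : Claim_equal_tick := by
  intro model _hdom hpre
  obtain ⟨w, h, prev⟩ := model
  unfold Pre_tick at hpre
  unfold Spec_tick
  rcases hpre with ⟨hh, hw⟩ | h0 | w0 | hemp
  · exact tick_eq_main w h prev hh hw
  · exact tick_eq_degenerate w h prev (Or.inl h0)
  · exact tick_eq_degenerate w h prev (Or.inr w0)
  · exact tick_eq_empty w h prev hemp
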